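-- pv_equiv track=rewrite | github.com/padgittl/PfamFigures | scripts/drawDomainFiguresWithOverlap_v5_dovetail.py | createColorPalette
-- ===== SOURCE A (Python) =====
-- def createColorPalette(geneDict,hopGeneID):
--     colors = ['#67001f','#b2182b','#d6604d','#f4a582','#fddbc7','#f7f7f7','#d1e5f0','#92c5de','#4393c3','#2166ac','#053061']
--     #print colors
--     colorStuff = {}
--     accessionDict = {}
--     accessionList = []
--     for accessionID,accessionDesc,domainStart,domainStop,scaledStart,scaledStop in geneDict:
--         if accessionID not in accessionDict:
--             accessionDict[accessionID] = 1
--             accessionList.append(accessionID)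
--     for i in range(len(accessionList)):
--         if accessionList[i] not in colorStuff:
--             colorStuff[accessionList[i]] = colors[i]
--             #print hopGeneID,accessionList[i],colors[i]
--     return(colorStuff)
-- ===== SOURCE B (Python) =====
-- def createColorPalette(geneDict, hopGeneID):
--     colors = ['#67001f','#b2182b','#d6604d','#f4a582','#fddbc7','#f7f7f7','#d1e5f0','#92c5de','#4393c3','#2166ac','#053061']
--     colorStuff = {}
--     counter = 0
--     for accessionID, accessionDesc, domainStart, domainStop, scaledStart, scaledStop in geneDict:
--         if accessionID not in colorStuff:
--             colorStuff[accessionID] = colors[counter]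
--             counter += 1
--     return colorStuff
-- ===== Notes on version B (the rewrite author's own statement) =====
-- stated objective: simpler
-- what changed: Replaced A's two sequential passes (build a seen-dict plus an ordered accession list, then an index loop assigning colors[i]) by one pass over geneDict that uses the result dict itself as the seen-set with an explicit counter, eliminating accessionDict, accessionList and the range loop.
import Mathlib
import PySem

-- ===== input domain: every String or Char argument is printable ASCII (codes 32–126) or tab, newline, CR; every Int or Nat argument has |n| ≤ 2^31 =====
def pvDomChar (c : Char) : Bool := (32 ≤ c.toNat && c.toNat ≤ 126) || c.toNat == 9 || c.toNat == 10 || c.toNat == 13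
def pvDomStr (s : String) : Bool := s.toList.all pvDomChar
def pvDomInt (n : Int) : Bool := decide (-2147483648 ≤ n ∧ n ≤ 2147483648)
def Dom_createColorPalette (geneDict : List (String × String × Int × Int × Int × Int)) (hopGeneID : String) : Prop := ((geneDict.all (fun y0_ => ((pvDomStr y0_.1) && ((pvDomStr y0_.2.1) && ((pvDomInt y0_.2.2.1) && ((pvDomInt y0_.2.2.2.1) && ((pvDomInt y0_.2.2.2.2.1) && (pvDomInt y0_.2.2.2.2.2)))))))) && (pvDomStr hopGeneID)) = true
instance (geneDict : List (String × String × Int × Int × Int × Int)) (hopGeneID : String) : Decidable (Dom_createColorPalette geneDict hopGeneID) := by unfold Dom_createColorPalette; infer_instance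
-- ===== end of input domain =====

-- B replaces A's two sequential passes by a single pass that uses the result dict as the seen-set with a counter; same return value on Pre_ (≤ 11 distinct accession IDs, beyond which Python A raises IndexError).


-- the shared colour palette literal
def pvColors : List String := ["#67001f","#b2182b","#d6604d","#f4a582","#fddbc7","#f7f7f7","#d1e5f0","#92c5de","#4393c3","#2166ac","#053061"]

-- ===== PORT A =====
def createColorPalette (geneDict : List (String × String × Int × Int × Int × Int)) (hopGeneID : String) : List (String × String) :=
  let colors := pvColors
  -- first loop: build accessionDict (seen-set) and accessionList (first-occurrence order)
  let st := geneDict.foldl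
    (fun (st : PySem.Dict String Int × List String) t =>
      if st.1.contains t.1 then st
      else (st.1.insert t.1 1, st.2 ++ [t.1]))
    (PySem.Dict.empty, [])
  let accessionList := st.2
  -- second loop: for i in range(len(accessionList)) assign colors[i]
  -- colors[i] raises IndexError for i ≥ 11 in Python: excluded by Pre_, modelled with pyGetD
  let colorStuff := (PySem.List.pyRange 0 (accessionList.length : Int) 1).foldl
    (fun (cs : PySem.Dict String String) i =>
      if cs.contains (PySem.List.pyGetD accessionList i "") then cs
      else cs.insert (PySem.List.pyGetD accessionList i "") (PySem.List.pyGetD colors i ""))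
    PySem.Dict.empty
  colorStuff.items

-- ===== PORT B =====
def createColorPalette_alt (geneDict : List (String × String × Int × Int × Int × Int)) (hopGeneID : String) : List (String × String) :=
  let colors := pvColors
  -- single pass: result dict is the seen-set, counter indexes the palette
  let st := geneDict.foldl
    (fun (st : PySem.Dict String String × Int) t =>
      if st.1.contains t.1 then st
      else (st.1.insert t.1 (PySem.List.pyGetD colors st.2 ""), st.2 + 1))
    (PySem.Dict.empty, 0)
  st.1.items

-- ===== PRECONDITION & SPEC =====
-- Pre_ excludes inputs with more than 11 distinct accession IDs, on which Python A (and B) raise IndexError (colors has 11 entries).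
def Pre_createColorPalette (geneDict : List (String × String × Int × Int × Int × Int)) (hopGeneID : String) : Prop :=
  (PySem.List.dedup (geneDict.map (fun t => t.1))).length ≤ 11
instance (geneDict : List (String × String × Int × Int × Int × Int)) (hopGeneID : String) : Decidable (Pre_createColorPalette geneDict hopGeneID) := by unfold Pre_createColorPalette; infer_instance
def pvWitness_createColorPalette : (List (String × String × Int × Int × Int × Int)) × String :=
  ([("PF0001", "kinase", 1, 10, 2, 20), ("PF0002", "lectin", 5, 9, 10, 18), ("PF0001", "kinase", 3, 7, 6, 14)], "gene1")

def Spec_createColorPalette (geneDict : List (String × String × Int × Int × Int × Int)) (hopGeneID : String) (out : List (String × String)) : Prop := out = createColorPalette_alt geneDict hopGeneID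
instance (geneDict : List (String × String × Int × Int × Int × Int)) (hopGeneID : String) (out : List (String × String)) : Decidable (Spec_createColorPalette geneDict hopGeneID out) := by unfold Spec_createColorPalette; infer_instance

-- ===== CLAIM (what is proved, stated in full; the proofs are below) =====
def Claim_equal_createColorPalette : Prop := ∀ (geneDict : List (String × String × Int × Int × Int × Int)) (hopGeneID : String), Dom_createColorPalette geneDict hopGeneID → Pre_createColorPalette geneDict hopGeneID → Spec_createColorPalette geneDict hopGeneID (createColorPalette geneDict hopGeneID)

-- ===== LEMMAS AND PROOFS =====

-- first-occurrence keys of l that are not in seen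
def pvFresh (seen : List String) : List String → List String
  | [] => []
  | x :: xs => if x ∈ seen then pvFresh seen xs else x :: pvFresh (x :: seen) xs

-- the dict contents both loops end with: keys of L painted with colors from index k on
def pvPaint : List String → Int → List (String × String)
  | [], _ => []
  | x :: xs, k => (x, PySem.List.pyGetD pvColors k "") :: pvPaint xs (k + 1)

theorem pvFresh_congr (s s' : List String) (l : List String)
    (h : ∀ y, y ∈ s ↔ y ∈ s') : pvFresh s l = pvFresh s' l := by
  induction l generalizing s s' with
  | nil => rfl
  | cons x xs ih =>
    simp only [pvFresh, (h x)]
    split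
    · exact ih s s' h
    · exact congrArg _ (ih (x :: s) (x :: s') (by intro y; simp [h y]))

theorem pvFresh_not_mem_seen (s l : List String) (y : String)
    (hy : y ∈ pvFresh s l) : y ∉ s := by
  induction l generalizing s with
  | nil => simp [pvFresh] at hy
  | cons x xs ih =>
    simp only [pvFresh] at hy
    split at hy
    · exact ih s hy
    · rw [List.mem_cons] at hy
      rcases hy with rfl | hy
      · assumption
      · exact fun hmem => ih (x :: s) hy (List.mem_cons_of_mem _ hmem)

theorem pvFresh_nodup (s l : List String) : (pvFresh s l).Nodup := by
  induction l generalizing s with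
  | nil => exact List.nodup_nil
  | cons x xs ih =>
    simp only [pvFresh]
    split
    · exact ih s
    · exact List.nodup_cons.mpr ⟨fun h => pvFresh_not_mem_seen _ _ _ h (List.mem_cons_self), ih (x :: s)⟩

-- A's first loop collects the first-occurrence list
theorem pvFoldA1 (ks : List String) (d : PySem.Dict String Int) (acc : List String)
    (h : ∀ y, d.contains y = decide (y ∈ acc)) :
    (ks.foldl (fun (st : PySem.Dict String Int × List String) x =>
        if st.1.contains x then st else (st.1.insert x 1, st.2 ++ [x])) (d, acc)).2
      = acc ++ pvFresh acc ks := by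
  induction ks generalizing d acc with
  | nil => simp [pvFresh]
  | cons x xs ih =>
    simp only [List.foldl_cons, pvFresh]
    by_cases hx : x ∈ acc
    · rw [if_pos (by simp [h x, hx]), if_pos hx]
      exact ih d acc h
    · rw [if_neg (by simp [h x, hx]), if_neg hx]
      rw [ih (d.insert x 1) (acc ++ [x])
        (by intro y; rw [PySem.Dict.contains_insert, h y]; by_cases hyx : y = x <;> simp [hyx])]
      rw [pvFresh_congr (x :: acc) (acc ++ [x]) xs (by intro y; simp; tauto)]
      simp

-- A's second loop paints a fresh nodup list with colors by index
theorem pvFoldA2 (L : List String) (a : Nat) (cs : PySem.Dict String String)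
    (hnd : (L.drop a).Nodup) (hfree : ∀ x ∈ L.drop a, cs.contains x = false) :
    ((PySem.List.pyRange (a : Int) (L.length : Int) 1).foldl
      (fun (cs : PySem.Dict String String) i =>
        if cs.contains (PySem.List.pyGetD L i "") then cs
        else cs.insert (PySem.List.pyGetD L i "") (PySem.List.pyGetD pvColors i ""))
      cs).items = cs.items ++ pvPaint (L.drop a) (a : Int) := by
  by_cases hlt : a < L.length
  · have hdrop : L.drop a = L[a] :: L.drop (a + 1) := (List.drop_eq_getElem_cons hlt)
    rw [PySem.List.pyRange_one_cons (by exact_mod_cast hlt)]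
    have hget : PySem.List.pyGetD L (a : Int) "" = L[a] := by
      rw [PySem.List.pyGetD_natCast]; simp [hlt]
    simp only [List.foldl_cons, hget]
    have hcont : cs.contains L[a] = false := hfree _ (by rw [hdrop]; exact List.mem_cons_self)
    rw [if_neg (by simp [hcont])]
    have hnd' : (L.drop (a + 1)).Nodup := by rw [hdrop] at hnd; exact hnd.of_cons
    have hne : L[a] ∉ L.drop (a + 1) := by
      rw [hdrop] at hnd; exact (List.nodup_cons.mp hnd).1
    have := pvFoldA2 L (a + 1) (cs.insert L[a] (PySem.List.pyGetD pvColors (a : Int) ""))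
      hnd' (by
        intro x hx
        rw [PySem.Dict.contains_insert, hfree x (by rw [hdrop]; exact List.mem_cons_of_mem _ hx)]
        simp; intro hxe; exact hne (hxe ▸ hx))
    push_cast at this ⊢
    rw [this, PySem.Dict.items_insert_of_not_contains _ _ hcont, hdrop]
    simp [pvPaint]
  · rw [PySem.List.pyRange_one_eq_nil (by exact_mod_cast Nat.le_of_not_lt hlt)]
    simp [List.drop_eq_nil_of_le (Nat.le_of_not_lt hlt), pvPaint]
termination_by L.length - a

-- B's single pass builds the same painted dict
theorem pvFoldB (ks : List String) (d : PySem.Dict String String) (hnd : d.keys.Nodup) :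
    ((ks.foldl (fun (st : PySem.Dict String String × Int) x =>
        if st.1.contains x then st
        else (st.1.insert x (PySem.List.pyGetD pvColors st.2 ""), st.2 + 1))
      (d, (d.size : Int))).1).items
      = d.items ++ pvPaint (pvFresh d.keys ks) (d.size : Int) := by
  induction ks generalizing d with
  | nil => simp [pvFresh, pvPaint]
  | cons x xs ih =>
    simp only [List.foldl_cons, pvFresh]
    by_cases hx : x ∈ d.keys
    · rw [if_pos ((PySem.Dict.contains_iff_mem_keys _ _).mpr hx), if_pos hx]
      exact ih d hnd
    · have hcont : d.contains x = false := by
        rw [← Bool.not_eq_true, PySem.Dict.contains_iff_mem_keys]; exact hx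
      rw [if_neg (by simp [hcont]), if_neg hx]
      have hsize : ((d.size : Int) + 1) = ((d.insert x (PySem.List.pyGetD pvColors (d.size : Int) "")).size : Int) := by
        rw [PySem.Dict.size_insert]; simp [hcont]
      rw [hsize, ih _ (PySem.Dict.nodup_keys_insert _ _ _ hnd)]
      rw [PySem.Dict.items_insert_of_not_contains _ _ hcont,
          PySem.Dict.keys_insert_of_not_contains _ _ hcont,
          pvFresh_congr (d.keys ++ [x]) (x :: d.keys) xs (by intro y; simp; tauto)]
      rw [← hsize]
      simp [pvPaint]

-- ===== VERDICT (by name: the statement is the Claim_ definition above) =====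
theorem createColorPalette_spec : Claim_equal_createColorPalette := by
  intro geneDict hopGeneID _ _
  unfold Spec_createColorPalette createColorPalette createColorPalette_alt
  simp only []
  -- reduce both folds over tuples to folds over the list of accession IDs
  have hmapA : geneDict.foldl
      (fun (st : PySem.Dict String Int × List String) t =>
        if st.1.contains t.1 then st else (st.1.insert t.1 1, st.2 ++ [t.1]))
      (PySem.Dict.empty, [])
    = (geneDict.map (fun t => t.1)).foldl
      (fun (st : PySem.Dict String Int × List String) x =>
        if st.1.contains x then st else (st.1.insert x 1, st.2 ++ [x]))
      (PySem.Dict.empty, []) := by rw [List.foldl_map]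
  have hmapB : geneDict.foldl
      (fun (st : PySem.Dict String String × Int) t =>
        if st.1.contains t.1 then st
        else (st.1.insert t.1 (PySem.List.pyGetD pvColors st.2 ""), st.2 + 1))
      (PySem.Dict.empty, 0)
    = (geneDict.map (fun t => t.1)).foldl
      (fun (st : PySem.Dict String String × Int) x =>
        if st.1.contains x then st
        else (st.1.insert x (PySem.List.pyGetD pvColors st.2 ""), st.2 + 1))
      (PySem.Dict.empty, 0) := by rw [List.foldl_map]
  rw [hmapA, hmapB]
  set ks := geneDict.map (fun t => t.1) with hks
  have hA1 := pvFoldA1 ks PySem.Dict.empty [] (by intro y; simp)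
  rw [hA1]
  have hA2 := pvFoldA2 (pvFresh [] ks) 0 PySem.Dict.empty (by simpa using pvFresh_nodup [] ks)
    (by intro x _; simp)
  norm_num at hA2
  simp only [List.nil_append]
  rw [hA2]
  have hB := pvFoldB ks PySem.Dict.empty (by simp)
  simp only [PySem.Dict.size_empty, Nat.cast_zero, PySem.Dict.keys_empty] at hB
  rw [hB]
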